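-- pv_equiv track=rewrite | github.com/thibault-chausson/challengeIT45 | population_initiale.py | contrainte8
-- ===== SOURCE A (Python) =====
-- def contrainte8(solution, Intervenant, Mission):
--     # 8.  Respecter l’amplitude de la journee de travail de chaque intervenant (amplitude = 12h)
--     for i in range(len(Intervenant)):
--         temps_travaille = {1: [2000, 0], 2: [2000, 0], 3: [2000, 0], 4: [2000, 0], 5: [2000, 0]}
--         for j in range(len(Mission)):
--             if solution[i][j] == 1:
--                 if Mission[j][2] < temps_travaille[Mission[j][1]][0]:
--                     temps_travaille[Mission[j][1]][0] = Mission[j][2]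
--                 if Mission[j][3] > temps_travaille[Mission[j][1]][1]:
--                     temps_travaille[Mission[j][1]][1] = Mission[j][3]
--         for k in temps_travaille:
--             if temps_travaille[k][1] - temps_travaille[k][0] > 720:
--                 return False
--     return True
-- ===== SOURCE B (Python) =====
-- def contrainte8(solution, Intervenant, Mission):
--     # Simpler: collect each intervenant's selected missions once, then judge each
--     # day 1..5 by max(end) - min(start) over that day's missions (skip empty days).
--     for i in range(len(Intervenant)):
--         selected = [Mission[j] for j in range(len(Mission)) if solution[i][j] == 1]
--         for day in (1, 2, 3, 4, 5):
--             todays = [m for m in selected if m[1] == day]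
--             if todays and max(m[3] for m in todays) - min(m[2] for m in todays) > 720:
--                 return False
--     return True
-- ===== Notes on version B (the rewrite author's own statement) =====
-- stated objective: simpler
-- what changed: Replaces the sentinel-pair dict [2000,0] with incremental min/max updates by a collect-then-reduce pass: filter each intervenant's selected missions once, group by day with a comprehension, and compare max(end)-min(start) per non-empty day.
-- outside the precondition, e.g. on contrainte8([[1]], [7], [[0, 1, 3000, 3100]]): A returns False, B returns True
import Mathlib
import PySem

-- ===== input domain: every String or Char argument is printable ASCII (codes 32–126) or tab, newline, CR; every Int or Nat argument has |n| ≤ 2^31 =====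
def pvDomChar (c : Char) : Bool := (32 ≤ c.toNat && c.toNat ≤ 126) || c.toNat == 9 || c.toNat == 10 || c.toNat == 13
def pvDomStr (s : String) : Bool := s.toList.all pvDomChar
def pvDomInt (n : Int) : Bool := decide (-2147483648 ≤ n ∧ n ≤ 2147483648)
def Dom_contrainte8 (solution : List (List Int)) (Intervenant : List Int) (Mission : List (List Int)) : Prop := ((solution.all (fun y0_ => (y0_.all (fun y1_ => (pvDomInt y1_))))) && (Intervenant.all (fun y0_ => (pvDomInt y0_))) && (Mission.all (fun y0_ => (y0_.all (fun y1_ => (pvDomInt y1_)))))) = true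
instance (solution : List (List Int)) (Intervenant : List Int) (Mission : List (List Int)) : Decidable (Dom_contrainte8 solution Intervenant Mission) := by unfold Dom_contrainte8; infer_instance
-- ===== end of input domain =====

-- B replaces A's sentinel-pair [2000, 0] incremental min/max dict by a collect-then-reduce
-- pass (filter the selected missions, group them by day, compare max(end) - min(start) on
-- non-empty days); objective: simpler.

-- ===== PORT A =====
-- one step of A's inner 'for j' loop: conditional in-place min/max update of the day's pair
def c8_step (Mission : List (List Int)) (soli : List Int) (t : PySem.Dict Int (Int × Int)) (j : Int) : PySem.Dict Int (Int × Int) :=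
  if PySem.List.pyGetD soli j 0 = 1 then
    let m := PySem.List.pyGetD Mission j []
    let day := PySem.List.pyGetD m 1 0
    let t1 := if PySem.List.pyGetD m 2 0 < (t.getD day (0, 0)).1
              then t.insert day (PySem.List.pyGetD m 2 0, (t.getD day (0, 0)).2) else t
    if PySem.List.pyGetD m 3 0 > (t1.getD day (0, 0)).2
              then t1.insert day ((t1.getD day (0, 0)).1, PySem.List.pyGetD m 3 0) else t1
  else t

def c8_init : PySem.Dict Int (Int × Int) :=
  PySem.Dict.ofList [(1, (2000, 0)), (2, (2000, 0)), (3, (2000, 0)), (4, (2000, 0)), (5, (2000, 0))]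

def contrainte8 (solution : List (List Int)) (Intervenant : List Int) (Mission : List (List Int)) : Bool :=
  (PySem.List.pyRange 0 (Intervenant.length : Int) 1).all (fun i =>
    let soli := PySem.List.pyGetD solution i []
    let t := (PySem.List.pyRange 0 (Mission.length : Int) 1).foldl (c8_step Mission soli) c8_init
    t.items.all (fun kv => !decide (kv.2.2 - kv.2.1 > 720)))

-- ===== PORT B =====
def contrainte8_alt (solution : List (List Int)) (Intervenant : List Int) (Mission : List (List Int)) : Bool :=
  (PySem.List.pyRange 0 (Intervenant.length : Int) 1).all (fun i =>
    let soli := PySem.List.pyGetD solution i []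
    let selected := (PySem.List.pyRange 0 (Mission.length : Int) 1).foldl
      (fun acc j => if PySem.List.pyGetD soli j 0 = 1 then acc ++ [PySem.List.pyGetD Mission j []] else acc) []
    ([1, 2, 3, 4, 5] : List Int).all (fun day =>
      let todays := selected.filter (fun m => PySem.List.pyGetD m 1 0 == day)
      !(!todays.isEmpty &&
        decide ((PySem.List.max? (todays.map (fun m => PySem.List.pyGetD m 3 0)) (fun x => x)).getD 0
          - (PySem.List.min? (todays.map (fun m => PySem.List.pyGetD m 2 0)) (fun x => x)).getD 0 > 720))))

-- ===== PRECONDITION & SPEC =====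
-- Pre_ excludes the inputs on which A raises (a solution row or a selected mission entry too
-- short for the indexing — IndexError — or a selected mission whose day is outside the dict
-- keys 1..5 — KeyError), and inputs whose selected missions carry start/end times outside the
-- minutes-of-day range 0..1440 (the natural domain), where A's sentinel initialization
-- [2000, 0] distorts the amplitude.
def Pre_contrainte8 (solution : List (List Int)) (Intervenant : List Int) (Mission : List (List Int)) : Prop :=
  Intervenant.length ≤ solution.length ∧
  ∀ i < Intervenant.length,
    Mission.length ≤ (solution.getD i []).length ∧
    ∀ j < Mission.length, (solution.getD i []).getD j 0 = 1 →
      4 ≤ (Mission.getD j []).length ∧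
      1 ≤ (Mission.getD j []).getD 1 0 ∧ (Mission.getD j []).getD 1 0 ≤ 5 ∧
      0 ≤ (Mission.getD j []).getD 2 0 ∧ (Mission.getD j []).getD 2 0 ≤ 1440 ∧
      0 ≤ (Mission.getD j []).getD 3 0 ∧ (Mission.getD j []).getD 3 0 ≤ 1440
instance (solution : List (List Int)) (Intervenant : List Int) (Mission : List (List Int)) : Decidable (Pre_contrainte8 solution Intervenant Mission) := by unfold Pre_contrainte8; infer_instance

def pvWitness_contrainte8 : List (List Int) × List Int × List (List Int) :=
  ([[1]], [7], [[0, 1, 600, 700]])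

def Spec_contrainte8 (solution : List (List Int)) (Intervenant : List Int) (Mission : List (List Int)) (out : Bool) : Prop := out = contrainte8_alt solution Intervenant Mission
instance (solution : List (List Int)) (Intervenant : List Int) (Mission : List (List Int)) (out : Bool) : Decidable (Spec_contrainte8 solution Intervenant Mission out) := by unfold Spec_contrainte8; infer_instance

-- ===== CLAIM (what is proved, stated in full; the proofs are below) =====
def Claim_equal_contrainte8 : Prop := ∀ (solution : List (List Int)) (Intervenant : List Int) (Mission : List (List Int)), Dom_contrainte8 solution Intervenant Mission → Pre_contrainte8 solution Intervenant Mission → Spec_contrainte8 solution Intervenant Mission (contrainte8 solution Intervenant Mission)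

-- ===== LEMMAS AND PROOFS =====

-- mission-field abbreviations and A's update split into its two conditional writes (proof-side)
def c8_day (m : List Int) : Int := PySem.List.pyGetD m 1 0
def c8_st (m : List Int) : Int := PySem.List.pyGetD m 2 0
def c8_en (m : List Int) : Int := PySem.List.pyGetD m 3 0
def c8_upd1 (t : PySem.Dict Int (Int × Int)) (m : List Int) : PySem.Dict Int (Int × Int) :=
  if c8_st m < (t.getD (c8_day m) (0, 0)).1
  then t.insert (c8_day m) (c8_st m, (t.getD (c8_day m) (0, 0)).2) else t
def c8_upd2 (t1 : PySem.Dict Int (Int × Int)) (m : List Int) : PySem.Dict Int (Int × Int) :=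
  if c8_en m > (t1.getD (c8_day m) (0, 0)).2
  then t1.insert (c8_day m) ((t1.getD (c8_day m) (0, 0)).1, c8_en m) else t1
def c8_upd (t : PySem.Dict Int (Int × Int)) (m : List Int) : PySem.Dict Int (Int × Int) :=
  c8_upd2 (c8_upd1 t m) m
def c8_stepv (acc : Int × Int) (m : List Int) : Int × Int :=
  (min acc.1 (c8_st m), max acc.2 (c8_en m))

theorem c8_step_eq (Mission : List (List Int)) (soli : List Int) (t : PySem.Dict Int (Int × Int)) (j : Int) :
    c8_step Mission soli t j =
      if PySem.List.pyGetD soli j 0 = 1 then c8_upd t (PySem.List.pyGetD Mission j []) else t := rfl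

theorem c8_getD_upd1 (t : PySem.Dict Int (Int × Int)) (m : List Int) (k : Int) :
    (c8_upd1 t m).getD k (0, 0) =
      if k = c8_day m then (min (t.getD k (0, 0)).1 (c8_st m), (t.getD k (0, 0)).2)
      else t.getD k (0, 0) := by
  unfold c8_upd1
  by_cases hk : k = c8_day m
  · subst hk
    rw [if_pos rfl]
    split_ifs with h1
    · rw [PySem.Dict.getD_insert, if_pos rfl]
      have hmin : min (t.getD (c8_day m) (0, 0)).1 (c8_st m) = c8_st m := by omega
      rw [hmin]
    · have hmin : min (t.getD (c8_day m) (0, 0)).1 (c8_st m) = (t.getD (c8_day m) (0, 0)).1 := by omega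
      rw [hmin]
  · rw [if_neg hk]
    split_ifs with h1
    · rw [PySem.Dict.getD_insert, if_neg hk]
    · rfl

theorem c8_getD_upd2 (t : PySem.Dict Int (Int × Int)) (m : List Int) (k : Int) :
    (c8_upd2 t m).getD k (0, 0) =
      if k = c8_day m then ((t.getD k (0, 0)).1, max (t.getD k (0, 0)).2 (c8_en m))
      else t.getD k (0, 0) := by
  unfold c8_upd2
  by_cases hk : k = c8_day m
  · subst hk
    rw [if_pos rfl]
    split_ifs with h1
    · rw [PySem.Dict.getD_insert, if_pos rfl]
      have hmax : max (t.getD (c8_day m) (0, 0)).2 (c8_en m) = c8_en m := by omega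
      rw [hmax]
    · have hmax : max (t.getD (c8_day m) (0, 0)).2 (c8_en m) = (t.getD (c8_day m) (0, 0)).2 := by omega
      rw [hmax]
  · rw [if_neg hk]
    split_ifs with h1
    · rw [PySem.Dict.getD_insert, if_neg hk]
    · rfl

theorem c8_getD_upd (t : PySem.Dict Int (Int × Int)) (m : List Int) (k : Int) :
    (c8_upd t m).getD k (0, 0) =
      if k = c8_day m then c8_stepv (t.getD k (0, 0)) m else t.getD k (0, 0) := by
  unfold c8_upd c8_stepv
  rw [c8_getD_upd2]
  by_cases hk : k = c8_day m <;> simp [hk, c8_getD_upd1]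

theorem c8_keys_upd (t : PySem.Dict Int (Int × Int)) (m : List Int) (h : c8_day m ∈ t.keys) :
    (c8_upd t m).keys = t.keys := by
  have hc : t.contains (c8_day m) = true := (PySem.Dict.contains_iff_mem_keys t _).2 h
  have h1 : (c8_upd1 t m).keys = t.keys := by
    unfold c8_upd1; split_ifs <;> simp [PySem.Dict.keys_insert_of_contains _ _ hc]
  have hc1 : (c8_upd1 t m).contains (c8_day m) = true := by
    rw [PySem.Dict.contains_iff_mem_keys, h1]; exact h
  unfold c8_upd c8_upd2
  split_ifs <;> simp [PySem.Dict.keys_insert_of_contains _ _ hc1, h1]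

theorem c8_fold_getD (ms : List (List Int)) : ∀ (t : PySem.Dict Int (Int × Int)) (k : Int),
    (ms.foldl c8_upd t).getD k (0, 0) =
      (ms.filter (fun m => c8_day m == k)).foldl c8_stepv (t.getD k (0, 0)) := by
  induction ms with
  | nil => intro t k; rfl
  | cons m ms ih =>
    intro t k
    by_cases hd : c8_day m = k
    · have hf : List.filter (fun m => c8_day m == k) (m :: ms)
          = m :: List.filter (fun m => c8_day m == k) ms := by simp [hd]
      rw [List.foldl_cons, ih, hf, List.foldl_cons, c8_getD_upd, if_pos hd.symm]
    · have hf : List.filter (fun m => c8_day m == k) (m :: ms)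
          = List.filter (fun m => c8_day m == k) ms := by simp [hd]
      rw [List.foldl_cons, ih, hf, c8_getD_upd, if_neg (fun h => hd h.symm)]

theorem c8_fold_keys (ms : List (List Int)) : ∀ (t : PySem.Dict Int (Int × Int)),
    (∀ m ∈ ms, c8_day m ∈ t.keys) → (ms.foldl c8_upd t).keys = t.keys := by
  induction ms with
  | nil => intro t _; rfl
  | cons m ms ih =>
    intro t h
    have hk : (c8_upd t m).keys = t.keys := c8_keys_upd t m (h m (by simp))
    rw [List.foldl_cons, ih (c8_upd t m) (fun m' hm' => by rw [hk]; exact h m' (by simp [hm'])), hk]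

theorem c8_foldl_min_pull (l : List (List Int)) : ∀ (a b : Int),
    l.foldl (fun x m => min x (c8_st m)) (min a b) = min a (l.foldl (fun x m => min x (c8_st m)) b) := by
  induction l with
  | nil => intro a b; rfl
  | cons c l ih =>
    intro a b
    rw [List.foldl_cons, List.foldl_cons]
    have h : min (min a b) (c8_st c) = min a (min b (c8_st c)) := by omega
    rw [h, ih]

theorem c8_foldl_max_pull (l : List (List Int)) : ∀ (a b : Int),
    l.foldl (fun x m => max x (c8_en m)) (max a b) = max a (l.foldl (fun x m => max x (c8_en m)) b) := by
  induction l with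
  | nil => intro a b; rfl
  | cons c l ih =>
    intro a b
    rw [List.foldl_cons, List.foldl_cons]
    have h : max (max a b) (c8_en c) = max a (max b (c8_en c)) := by omega
    rw [h, ih]

theorem c8_foldl_min_le (l : List (List Int)) : ∀ (a : Int),
    l.foldl (fun x m => min x (c8_st m)) a ≤ a := by
  induction l with
  | nil => intro a; rw [List.foldl_nil]
  | cons c l ih =>
    intro a
    rw [List.foldl_cons]
    have h := ih (min a (c8_st c))
    omega

theorem c8_foldl_max_ge (l : List (List Int)) : ∀ (a : Int),
    a ≤ l.foldl (fun x m => max x (c8_en m)) a := by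
  induction l with
  | nil => intro a; rw [List.foldl_nil]
  | cons c l ih =>
    intro a
    rw [List.foldl_cons]
    have h := ih (max a (c8_en c))
    omega

-- the per-day check: A's sentinel fold equals B's skip-empty max-min reduction
theorem c8_day_check (td : List (List Int))
    (hb : ∀ m ∈ td, 0 ≤ c8_st m ∧ c8_st m ≤ 1440 ∧ 0 ≤ c8_en m ∧ c8_en m ≤ 1440) :
    (!decide ((td.foldl c8_stepv (2000, 0)).2 - (td.foldl c8_stepv (2000, 0)).1 > 720)) =
    (!(!td.isEmpty &&
        decide ((PySem.List.max? (td.map (fun m => PySem.List.pyGetD m 3 0)) (fun x => x)).getD 0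
          - (PySem.List.min? (td.map (fun m => PySem.List.pyGetD m 2 0)) (fun x => x)).getD 0 > 720))) := by
  cases td with
  | nil => decide
  | cons m0 r =>
    have hfold : (m0 :: r).foldl c8_stepv (2000, 0)
        = ((m0 :: r).foldl (fun x m => min x (c8_st m)) 2000, (m0 :: r).foldl (fun x m => max x (c8_en m)) 0) := by
      unfold c8_stepv
      exact PySem.List.foldl_prod_mk (fun x m => min x (c8_st m)) (fun x m => max x (c8_en m)) (m0 :: r) 2000 0
    have hmin : (m0 :: r).foldl (fun x m => min x (c8_st m)) 2000
        = r.foldl (fun x m => min x (c8_st m)) (c8_st m0) := by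
      rw [List.foldl_cons, c8_foldl_min_pull]
      have h1 := c8_foldl_min_le r (c8_st m0)
      have h0 := (hb m0 (by simp)).2.1
      omega
    have hmax : (m0 :: r).foldl (fun x m => max x (c8_en m)) 0
        = r.foldl (fun x m => max x (c8_en m)) (c8_en m0) := by
      rw [List.foldl_cons, c8_foldl_max_pull]
      have h1 := c8_foldl_max_ge r (c8_en m0)
      have h0 := (hb m0 (by simp)).2.2.1
      omega
    have hB3 : (PySem.List.max? ((m0 :: r).map (fun m => PySem.List.pyGetD m 3 0)) (fun x => x)).getD 0
        = r.foldl (fun x m => max x (c8_en m)) (c8_en m0) := by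
      rw [List.map_cons, PySem.List.max?_id_cons]
      simp [List.foldl_map, c8_en]
    have hB2 : (PySem.List.min? ((m0 :: r).map (fun m => PySem.List.pyGetD m 2 0)) (fun x => x)).getD 0
        = r.foldl (fun x m => min x (c8_st m)) (c8_st m0) := by
      rw [List.map_cons, PySem.List.min?_id_cons]
      simp [List.foldl_map, c8_st]
    rw [hfold, hB3, hB2]
    simp [hmin, hmax]

theorem c8_all_congr {α : Type} (l : List α) (f g : α → Bool) (h : ∀ x ∈ l, f x = g x) :
    l.all f = l.all g := by
  induction l with
  | nil => rfl
  | cons x xs ih => simp only [List.all_cons, h x (by simp), ih (fun y hy => h y (by simp [hy]))]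

-- A's guarded index loop is the unguarded update fold over the selected missions
theorem c8_fold_guard (Mission : List (List Int)) (soli : List Int) (l : List Int) :
    ∀ (t : PySem.Dict Int (Int × Int)),
    l.foldl (c8_step Mission soli) t
      = ((l.filter (fun j => PySem.List.pyGetD soli j 0 == 1)).map
          (fun j => PySem.List.pyGetD Mission j [])).foldl c8_upd t := by
  induction l with
  | nil => intro t; rfl
  | cons j l ih =>
    intro t
    by_cases hp : PySem.List.pyGetD soli j 0 = 1
    · have hf : List.filter (fun j => PySem.List.pyGetD soli j 0 == 1) (j :: l)
          = j :: List.filter (fun j => PySem.List.pyGetD soli j 0 == 1) l := by simp [hp]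
      rw [List.foldl_cons, c8_step_eq, if_pos hp, hf, List.map_cons, List.foldl_cons, ih]
    · have hf : List.filter (fun j => PySem.List.pyGetD soli j 0 == 1) (j :: l)
          = List.filter (fun j => PySem.List.pyGetD soli j 0 == 1) l := by simp [hp]
      rw [List.foldl_cons, c8_step_eq, if_neg hp, hf, ih]

-- B's append loop builds exactly the selected-mission list
theorem c8_fold_sel (Mission : List (List Int)) (soli : List Int) (l : List Int) :
    ∀ (acc : List (List Int)),
    l.foldl (fun acc j => if PySem.List.pyGetD soli j 0 = 1
        then acc ++ [PySem.List.pyGetD Mission j []] else acc) acc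
      = acc ++ (l.filter (fun j => PySem.List.pyGetD soli j 0 == 1)).map
          (fun j => PySem.List.pyGetD Mission j []) := by
  induction l with
  | nil => intro acc; simp
  | cons j l ih =>
    intro acc
    by_cases hp : PySem.List.pyGetD soli j 0 = 1
    · have hf : List.filter (fun j => PySem.List.pyGetD soli j 0 == 1) (j :: l)
          = j :: List.filter (fun j => PySem.List.pyGetD soli j 0 == 1) l := by simp [hp]
      rw [List.foldl_cons, if_pos hp, hf, List.map_cons, ih]
      simp
    · have hf : List.filter (fun j => PySem.List.pyGetD soli j 0 == 1) (j :: l)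
          = List.filter (fun j => PySem.List.pyGetD soli j 0 == 1) l := by simp [hp]
      rw [List.foldl_cons, if_neg hp, hf, ih]

theorem c8_init_keys : c8_init.keys = [1, 2, 3, 4, 5] := by decide

-- ===== VERDICT (by name: the statement is the Claim_ definition above) =====
theorem contrainte8_spec : Claim_equal_contrainte8 := by
  unfold Claim_equal_contrainte8
  intro solution Intervenant Mission _ hpre
  unfold Spec_contrainte8 contrainte8 contrainte8_alt
  obtain ⟨hlen, hrow⟩ := hpre
  apply c8_all_congr
  intro i hi
  rw [PySem.List.mem_pyRange_one] at hi
  obtain ⟨hi0, hiN⟩ := hi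
  dsimp only
  have hIt : i.toNat < Intervenant.length := by omega
  obtain ⟨hrlen, hsel⟩ := hrow i.toNat hIt
  have hsol_eq : PySem.List.pyGetD solution i [] = solution.getD i.toNat [] :=
    PySem.List.pyGetD_of_nonneg solution [] hi0
  -- both loops over the selected missions
  set ms := ((PySem.List.pyRange 0 (Mission.length : Int) 1).filter
      (fun j => PySem.List.pyGetD (PySem.List.pyGetD solution i []) j 0 == 1)).map
      (fun j => PySem.List.pyGetD Mission j []) with hms
  rw [c8_fold_guard, c8_fold_sel, ← hms, List.nil_append]
  -- facts about every selected mission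
  have hmem : ∀ m ∈ ms, (1 ≤ c8_day m ∧ c8_day m ≤ 5) ∧
      0 ≤ c8_st m ∧ c8_st m ≤ 1440 ∧ 0 ≤ c8_en m ∧ c8_en m ≤ 1440 := by
    intro m hm
    rw [hms] at hm
    obtain ⟨j, hjf, rfl⟩ := List.mem_map.1 hm
    obtain ⟨hjr, hj1⟩ := List.mem_filter.1 hjf
    rw [PySem.List.mem_pyRange_one] at hjr
    obtain ⟨hj0, hjN⟩ := hjr
    have hjt : j.toNat < Mission.length := by omega
    have hsel_j : (solution.getD i.toNat []).getD j.toNat 0 = 1 := by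
      rw [← hsol_eq, ← PySem.List.pyGetD_of_nonneg _ 0 hj0]
      exact of_decide_eq_true hj1
    obtain ⟨hml, h1a, h1b, h2a, h2b, h3a, h3b⟩ := hsel j.toNat hjt hsel_j
    have hm_eq : PySem.List.pyGetD Mission j [] = Mission.getD j.toNat [] :=
      PySem.List.pyGetD_of_nonneg Mission [] hj0
    refine ⟨⟨?_, ?_⟩, ?_, ?_, ?_, ?_⟩ <;>
      simp only [c8_day, c8_st, c8_en, hm_eq, PySem.List.pyGetD_ofNat'] <;> omega
  -- A's dict keeps exactly the keys 1..5
  have hkeys : ((ms.foldl c8_upd c8_init)).keys = [1, 2, 3, 4, 5] := by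
    rw [c8_fold_keys ms c8_init, c8_init_keys]
    intro m hm
    have h := (hmem m hm).1
    rw [c8_init_keys]
    simp only [List.mem_cons, List.not_mem_nil, or_false]
    omega
  have hnodup : ((ms.foldl c8_upd c8_init)).keys.Nodup := by rw [hkeys]; decide
  rw [PySem.Dict.items_eq_map_keys _ hnodup (0, 0), hkeys, List.all_map]
  -- compare day by day
  apply c8_all_congr
  intro k hk
  have hinit : c8_init.getD k (0, 0) = (2000, 0) := by
    simp only [List.mem_cons, List.not_mem_nil, or_false] at hk
    rcases hk with rfl | rfl | rfl | rfl | rfl <;> decide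
  have hb : ∀ m ∈ ms.filter (fun m => c8_day m == k),
      0 ≤ c8_st m ∧ c8_st m ≤ 1440 ∧ 0 ≤ c8_en m ∧ c8_en m ≤ 1440 :=
    fun m hm => (hmem m (List.mem_filter.1 hm).1).2
  have hdc := c8_day_check (ms.filter (fun m => c8_day m == k)) hb
  simp only [Function.comp, c8_fold_getD ms c8_init k, hinit]
  simpa [c8_day] using hdc
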